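-- pv_equiv track=rewrite | github.com/ln-one/Spectra | backend/services/generation_session_service/tool_refine_builder/mindmap.py | _delete_node_and_descendants
-- ===== SOURCE A (Python) =====
-- from typing import Any
--
-- def _normalize_node_id(value: Any) -> str:
--     return str(value or "").strip()
--
-- def _delete_node_and_descendants(nodes: list[dict[str, Any]], target_id: str) -> list[dict[str, Any]]:
--     descendants = {target_id}
--     changed = True
--     while changed:
--         changed = False
--         for node in nodes:
--             node_id = _normalize_node_id(node.get("id"))
--             parent_id = _normalize_node_id(node.get("parent_id"))
--             if parent_id in descendants and node_id and node_id not in descendants: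
--                 descendants.add(node_id)
--                 changed = True
--     return [dict(node) for node in nodes if _normalize_node_id(node.get("id")) not in descendants]
-- ===== SOURCE B (Python) =====
-- from typing import Any
--
-- def _normalize_node_id(value: Any) -> str:
--     return str(value or "").strip()
--
-- def _delete_node_and_descendants(nodes: list[dict[str, Any]], target_id: str) -> list[dict[str, Any]]:
--     # Build parent-id -> child-ids adjacency once, then a single DFS from target_id.
--     children: dict[str, list[str]] = {}
--     for node in nodes:
--         node_id = _normalize_node_id(node.get("id"))
--         if node_id:
--             children.setdefault(_normalize_node_id(node.get("parent_id")), []).append(node_id)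
--     descendants = {target_id}
--     stack = [target_id]
--     while stack:
--         pid = stack.pop()
--         for cid in children.get(pid, []):
--             if cid not in descendants:
--                 descendants.add(cid)
--                 stack.append(cid)
--     return [dict(node) for node in nodes if _normalize_node_id(node.get("id")) not in descendants]
-- ===== Notes on version B (the rewrite author's own statement) =====
-- stated objective: alternative
-- what changed: A finds descendants by repeated full passes over the node list until a fixpoint; B builds a parent-id -> child-ids adjacency map once and collects descendants with a single stack-based DFS from target_id.
import Mathlib
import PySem

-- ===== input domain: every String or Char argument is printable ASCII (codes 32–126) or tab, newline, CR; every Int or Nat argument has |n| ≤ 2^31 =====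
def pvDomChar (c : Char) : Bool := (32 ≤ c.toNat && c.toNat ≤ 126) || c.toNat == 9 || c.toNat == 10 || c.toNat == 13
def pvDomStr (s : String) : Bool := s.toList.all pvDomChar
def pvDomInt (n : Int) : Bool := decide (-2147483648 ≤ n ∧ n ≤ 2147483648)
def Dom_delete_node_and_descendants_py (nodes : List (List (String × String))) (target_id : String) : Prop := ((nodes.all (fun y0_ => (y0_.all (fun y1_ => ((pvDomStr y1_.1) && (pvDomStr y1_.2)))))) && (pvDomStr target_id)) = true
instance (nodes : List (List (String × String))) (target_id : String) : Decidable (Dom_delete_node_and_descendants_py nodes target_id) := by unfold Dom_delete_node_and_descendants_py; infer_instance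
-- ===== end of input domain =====

-- B replaces A's repeated fixpoint passes over the whole node list by one adjacency map plus a
-- single stack-based DFS from target_id (objective: alternative algorithm). The equivalence proved
-- is about the return value; `dict(node)` is a shallow copy, identity on the association-list model.

-- ===== PORT A =====
-- _normalize_node_id(value): str(value or "").strip(); on Option String this is .getD "" then strip
def pvNormId (o : Option String) : String := PySem.Str.strip (o.getD "")
def pvIdOf (node : List (String × String)) : String := pvNormId ((PySem.Dict.mk node).get? "id")
def pvParentOf (node : List (String × String)) : String := pvNormId ((PySem.Dict.mk node).get? "parent_id")

-- one `for node in nodes:` pass of A's while-loop body, state = (descendants, changed)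
def pvPassA (l : List (List (String × String))) (st : PySem.Set String × Bool) :
    PySem.Set String × Bool :=
  l.foldl (fun st node =>
    if st.1.contains (pvParentOf node) && pvIdOf node != "" && !(st.1.contains (pvIdOf node))
    then (st.1.add (pvIdOf node), true) else st) st

-- `while changed:` — fuel-bounded only to make the loop structurally total; fuel is proved sufficient below
def pvLoopA (nodes : List (List (String × String))) : Nat → PySem.Set String → PySem.Set String
  | 0, S => S
  | f + 1, S =>
    match pvPassA nodes (S, false) with
    | (S', true) => pvLoopA nodes f S'
    | (S', false) => S'

def delete_node_and_descendants_py (nodes : List (List (String × String))) (target_id : String) :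
    List (List (String × String)) :=
  let S := pvLoopA nodes (nodes.length + 2) (PySem.Set.ofList [target_id])
  nodes.filter (fun node => !(S.contains (pvIdOf node)))

-- ===== PORT B =====
-- children: dict parent_id -> list of child ids (setdefault(pid, []).append(nid) = modify pid [] (· ++ [nid]))
def pvChildren (nodes : List (List (String × String))) : PySem.Dict String (List String) :=
  nodes.foldl (fun d node =>
    if pvIdOf node != "" then d.modify (pvParentOf node) [] (· ++ [pvIdOf node]) else d)
    PySem.Dict.empty

-- `for cid in children.get(pid, []):` body, state = (descendants, stack)
def pvVisit (cs : List String) (st : PySem.Set String × List String) :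
    PySem.Set String × List String :=
  cs.foldl (fun st cid => if !(st.1.contains cid) then (st.1.add cid, st.2 ++ [cid]) else st) st

-- `while stack:` with stack.pop() popping from the end; fuel-bounded, fuel proved sufficient below
def pvLoopB (cmap : PySem.Dict String (List String)) :
    Nat → PySem.Set String × List String → PySem.Set String
  | 0, st => st.1
  | f + 1, st =>
    match PySem.List.pop? st.2 (-1) with
    | none => st.1
    | some (pid, rest) => pvLoopB cmap f (pvVisit (cmap.getD pid []) (st.1, rest))

def delete_node_and_descendants_py_alt (nodes : List (List (String × String))) (target_id : String) :
    List (List (String × String)) :=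
  let cmap := pvChildren nodes
  let S := pvLoopB cmap (nodes.length + 2) (PySem.Set.ofList [target_id], [target_id])
  nodes.filter (fun node => !(S.contains (pvIdOf node)))

-- ===== PRECONDITION & SPEC =====
def Spec_delete_node_and_descendants_py (nodes : List (List (String × String))) (target_id : String) (out : List (List (String × String))) : Prop := out = delete_node_and_descendants_py_alt nodes target_id
instance (nodes : List (List (String × String))) (target_id : String) (out : List (List (String × String))) : Decidable (Spec_delete_node_and_descendants_py nodes target_id out) := by unfold Spec_delete_node_and_descendants_py; infer_instance

-- ===== CLAIM (what is proved, stated in full; the proofs are below) =====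
def Claim_equal_delete_node_and_descendants_py : Prop := ∀ (nodes : List (List (String × String))) (target_id : String), Dom_delete_node_and_descendants_py nodes target_id → Spec_delete_node_and_descendants_py nodes target_id (delete_node_and_descendants_py nodes target_id)

-- ===== LEMMAS AND PROOFS =====

-- the closure both programs compute: target_id plus every id reachable along parent_id edges
inductive pvDesc (nodes : List (List (String × String))) (t : String) : String → Prop
  | base : pvDesc nodes t t
  | step (node : List (String × String)) (h : node ∈ nodes)
      (hp : pvDesc nodes t (pvParentOf node)) (hn : pvIdOf node ≠ "") :
      pvDesc nodes t (pvIdOf node)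

-- every id either program can ever hold
def pvCand (nodes : List (List (String × String))) (t : String) : List String :=
  t :: nodes.map pvIdOf

lemma pv_length_le_card (nodes : List (List (String × String))) (t : String)
    (S : List String) (h1 : S.Nodup) (h2 : ∀ x ∈ S, x ∈ pvCand nodes t) :
    S.length ≤ (pvCand nodes t).toFinset.card := by
  have hsub : S.toFinset ⊆ (pvCand nodes t).toFinset := by
    intro x hx
    simpa using h2 x (by simpa using hx)
  calc S.length = S.toFinset.card := (List.toFinset_card_of_nodup h1).symm
    _ ≤ _ := Finset.card_le_card hsub

lemma set_add_prefix (s : PySem.Set String) (x : String) : s <+: s.add x := by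
  unfold PySem.Set.add; split
  · exact List.prefix_refl s
  · exact List.prefix_append s [x]

-- ---- A-side pass lemmas ----
lemma passA_prefix (l : List (List (String × String))) (S : PySem.Set String) (b : Bool) :
    S <+: (pvPassA l (S, b)).1 := by
  induction l generalizing S b with
  | nil => exact List.prefix_refl S
  | cons node l ih =>
    simp only [pvPassA, List.foldl_cons]
    by_cases hc : (S.contains (pvParentOf node) && pvIdOf node != ""
        && !(S.contains (pvIdOf node))) = true
    · simp only [hc, if_true]
      exact (set_add_prefix S (pvIdOf node)).trans (ih (S.add (pvIdOf node)) true)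
    · simp only [hc]
      exact ih S b

lemma passA_flag_mono (l : List (List (String × String))) (S : PySem.Set String) :
    (pvPassA l (S, true)).2 = true := by
  induction l generalizing S with
  | nil => rfl
  | cons node l ih =>
    simp only [pvPassA, List.foldl_cons]
    by_cases hc : (S.contains (pvParentOf node) && pvIdOf node != ""
        && !(S.contains (pvIdOf node))) = true
    · simp only [hc, if_true]; exact ih (S.add (pvIdOf node))
    · simp only [hc]; exact ih S

lemma passA_nodup (l : List (List (String × String))) (S : PySem.Set String) (b : Bool)
    (h : S.Nodup) : (pvPassA l (S, b)).1.Nodup := by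
  induction l generalizing S b with
  | nil => exact h
  | cons node l ih =>
    simp only [pvPassA, List.foldl_cons]
    by_cases hc : (S.contains (pvParentOf node) && pvIdOf node != ""
        && !(S.contains (pvIdOf node))) = true
    · simp only [hc, if_true]; exact ih _ _ (PySem.Set.nodup_add S (pvIdOf node) h)
    · simp only [hc]; exact ih S b h

lemma passA_cand (nodes : List (List (String × String))) (t : String)
    (l : List (List (String × String))) (hl : ∀ n ∈ l, n ∈ nodes) :
    ∀ (S : PySem.Set String) (b : Bool), (∀ x ∈ S, x ∈ pvCand nodes t) →
      ∀ x ∈ (pvPassA l (S, b)).1, x ∈ pvCand nodes t := by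
  induction l with
  | nil => intro S b hS; exact hS
  | cons node l ih =>
    intro S b hS
    have hnode := hl node (by simp)
    have hl' : ∀ n ∈ l, n ∈ nodes := fun n hn => hl n (by simp [hn])
    simp only [pvPassA, List.foldl_cons]
    by_cases hc : (S.contains (pvParentOf node) && pvIdOf node != ""
        && !(S.contains (pvIdOf node))) = true
    · simp only [hc, if_true]
      refine ih hl' _ _ ?_
      intro x hx
      rcases (PySem.Set.mem_add S (pvIdOf node) x).1 hx with h | h
      · exact hS x h
      · subst h; exact List.mem_cons_of_mem _ (List.mem_map_of_mem hnode)
    · simp only [hc]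
      exact ih hl' S b hS

lemma passA_sound (nodes : List (List (String × String))) (t : String)
    (l : List (List (String × String))) (hl : ∀ n ∈ l, n ∈ nodes) :
    ∀ (S : PySem.Set String) (b : Bool), (∀ x ∈ S, pvDesc nodes t x) →
      ∀ x ∈ (pvPassA l (S, b)).1, pvDesc nodes t x := by
  induction l with
  | nil => intro S b hS; exact hS
  | cons node l ih =>
    intro S b hS
    have hnode := hl node (by simp)
    have hl' : ∀ n ∈ l, n ∈ nodes := fun n hn => hl n (by simp [hn])
    simp only [pvPassA, List.foldl_cons]
    by_cases hc : (S.contains (pvParentOf node) && pvIdOf node != ""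
        && !(S.contains (pvIdOf node))) = true
    · simp only [hc, if_true]
      refine ih hl' _ _ ?_
      intro x hx
      rcases (PySem.Set.mem_add S (pvIdOf node) x).1 hx with h | h
      · exact hS x h
      · subst h
        have hc' := hc
        simp only [Bool.and_eq_true, bne_iff_ne, PySem.Set.contains_iff] at hc'
        exact pvDesc.step node hnode (hS _ hc'.1.1) hc'.1.2
    · simp only [hc]
      exact ih hl' S b hS

lemma passA_changed (l : List (List (String × String))) :
    ∀ (S : PySem.Set String), (pvPassA l (S, false)).2 = true →
      S.length < (pvPassA l (S, false)).1.length := by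
  induction l with
  | nil => intro S h; exact absurd h (by simp [pvPassA])
  | cons node l ih =>
    intro S h
    by_cases hc : (S.contains (pvParentOf node) && pvIdOf node != ""
        && !(S.contains (pvIdOf node))) = true
    · have hnc : S.contains (pvIdOf node) = false := by
        simp only [Bool.and_eq_true, Bool.not_eq_true'] at hc
        exact hc.2
      have hlen : (S.add (pvIdOf node)).length = S.length + 1 := by
        have hmem : pvIdOf node ∉ S := fun hm => by
          rw [(PySem.Set.contains_iff S _).2 hm] at hnc; simp at hnc
        unfold PySem.Set.add
        simp [hmem]
      have hpre := passA_prefix l (S.add (pvIdOf node)) true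
      have := hpre.length_le
      have hgoal : (pvPassA (node :: l) (S, false)).1
          = (pvPassA l (S.add (pvIdOf node), true)).1 := by
        simp only [pvPassA, List.foldl_cons, hc, if_true]
      rw [hgoal]
      omega
    · have hstep : (if (S.contains (pvParentOf node) && pvIdOf node != ""
          && !(S.contains (pvIdOf node))) = true
          then (S.add (pvIdOf node), true) else ((S, false) : PySem.Set String × Bool))
          = (S, false) := if_neg hc
      have hred : pvPassA (node :: l) (S, false) = pvPassA l (S, false) := by
        simp only [pvPassA, List.foldl_cons, hstep]
      rw [hred] at h ⊢
      exact ih S h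

lemma passA_fix (l : List (List (String × String))) :
    ∀ (S : PySem.Set String), (pvPassA l (S, false)).2 = false →
      (pvPassA l (S, false)).1 = S ∧
      ∀ node ∈ l, (S.contains (pvParentOf node) && pvIdOf node != ""
        && !(S.contains (pvIdOf node))) = false := by
  induction l with
  | nil => intro S _; exact ⟨rfl, by simp⟩
  | cons node l ih =>
    intro S h
    by_cases hc : (S.contains (pvParentOf node) && pvIdOf node != ""
        && !(S.contains (pvIdOf node))) = true
    · exfalso
      have : (pvPassA (node :: l) (S, false)).2 = true := by
        simp only [pvPassA, List.foldl_cons, hc, if_true]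
        exact passA_flag_mono l (S.add (pvIdOf node))
      rw [h] at this; exact Bool.false_ne_true this
    · have hstep : (if (S.contains (pvParentOf node) && pvIdOf node != ""
          && !(S.contains (pvIdOf node))) = true
          then (S.add (pvIdOf node), true) else ((S, false) : PySem.Set String × Bool))
          = (S, false) := if_neg hc
      have hred : pvPassA (node :: l) (S, false) = pvPassA l (S, false) := by
        simp only [pvPassA, List.foldl_cons, hstep]
      rw [hred] at h ⊢
      rcases ih S h with ⟨h1, h2⟩
      refine ⟨h1, ?_⟩
      intro n hn
      rcases List.mem_cons.1 hn with rfl | hn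
      · exact Bool.eq_false_iff.2 hc
      · exact h2 n hn

lemma loopA_main (nodes : List (List (String × String))) (t : String) :
    ∀ (fuel : Nat) (S : PySem.Set String), S.Nodup → (∀ x ∈ S, x ∈ pvCand nodes t) →
      (∀ x ∈ S, pvDesc nodes t x) →
      (pvCand nodes t).toFinset.card + 1 ≤ fuel + S.length →
      (∀ x ∈ S, x ∈ pvLoopA nodes fuel S) ∧
      (∀ x ∈ pvLoopA nodes fuel S, pvDesc nodes t x) ∧
      (∀ node ∈ nodes, pvParentOf node ∈ pvLoopA nodes fuel S → pvIdOf node ≠ "" →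
        pvIdOf node ∈ pvLoopA nodes fuel S) := by
  intro fuel
  induction fuel with
  | zero =>
    intro S h1 h2 _ hb
    exfalso
    have := pv_length_le_card nodes t S h1 h2
    omega
  | succ f ih =>
    intro S h1 h2 h3 hb
    rcases hp : pvPassA nodes (S, false) with ⟨S', ch⟩
    cases ch with
    | true =>
      have hres : pvLoopA nodes (f + 1) S = pvLoopA nodes f S' := by
        rw [pvLoopA, hp]
      have hS'1 : S'.Nodup := by
        have := passA_nodup nodes S false h1; rwa [hp] at this
      have hS'2 : ∀ x ∈ S', x ∈ pvCand nodes t := by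
        have := passA_cand nodes t nodes (fun n hn => hn) S false h2; rwa [hp] at this
      have hS'3 : ∀ x ∈ S', pvDesc nodes t x := by
        have := passA_sound nodes t nodes (fun n hn => hn) S false h3; rwa [hp] at this
      have hsub : ∀ x ∈ S, x ∈ S' := by
        have := (passA_prefix nodes S false).subset; rw [hp] at this; exact this
      have hlen : S.length < S'.length := by
        have := passA_changed nodes S (by rw [hp]); rwa [hp] at this
      obtain ⟨p1, p2, p3⟩ := ih S' hS'1 hS'2 hS'3 (by omega)
      rw [hres]
      exact ⟨fun x hx => p1 x (hsub x hx), p2, p3⟩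
    | false =>
      have hres : pvLoopA nodes (f + 1) S = S' := by
        rw [pvLoopA, hp]
      obtain ⟨heq, hfix⟩ := passA_fix nodes S (by rw [hp])
      have hS'S : S' = S := by rw [← heq, hp]
      rw [hres, hS'S]
      refine ⟨fun x hx => hx, h3, ?_⟩
      intro node hn hpmem hid
      have hf := hfix node hn
      by_contra hmem
      have : (S.contains (pvParentOf node) && pvIdOf node != ""
          && !(S.contains (pvIdOf node))) = true := by
        simp [hpmem, bne_iff_ne, hid, hmem]
      rw [hf] at this
      simp at this

lemma memA (nodes : List (List (String × String))) (t : String) (x : String) :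
    x ∈ pvLoopA nodes (nodes.length + 2) (PySem.Set.ofList [t]) ↔ pvDesc nodes t x := by
  have h1 : (PySem.Set.ofList [t] : List String).Nodup := PySem.Set.nodup_ofList [t]
  have h2 : ∀ x ∈ (PySem.Set.ofList [t] : List String), x ∈ pvCand nodes t := by
    intro x hx
    have : x ∈ [t] := (PySem.Set.mem_ofList [t] x).1 hx
    simp at this
    simp [this, pvCand]
  have h3 : ∀ x ∈ (PySem.Set.ofList [t] : List String), pvDesc nodes t x := by
    intro x hx
    have : x ∈ [t] := (PySem.Set.mem_ofList [t] x).1 hx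
    simp at this
    exact this ▸ pvDesc.base
  have hlen : (PySem.Set.ofList [t] : List String).length = 1 := rfl
  have hcard : (pvCand nodes t).toFinset.card ≤ nodes.length + 1 := by
    have := List.toFinset_card_le (pvCand nodes t)
    simpa [pvCand] using this
  obtain ⟨p1, p2, p3⟩ := loopA_main nodes t (nodes.length + 2) (PySem.Set.ofList [t])
    h1 h2 h3 (by omega)
  constructor
  · exact p2 x
  · intro hd
    induction hd with
    | base => exact p1 t ((PySem.Set.mem_ofList [t] t).2 (by simp))
    | step node hmem hpp hn ih' => exact p3 node hmem ih' hn

-- ---- B-side adjacency-map lemmas ----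
lemma children_getD (nodes : List (List (String × String))) (pid : String) :
    (pvChildren nodes).getD pid [] =
      (((nodes.filter (fun n => pvIdOf n != "")).map (fun n => (pvParentOf n, pvIdOf n))).filter
        (fun p => p.1 == pid)).map (fun p => p.2) := by
  have h0 : pvChildren nodes =
      ((nodes.filter (fun n => pvIdOf n != "")).map (fun n => (pvParentOf n, pvIdOf n))).foldl
        (fun d p => d.modify p.1 [] (fun x => x ++ [p.2])) PySem.Dict.empty := by
    rw [List.foldl_map, List.foldl_filter]
    rfl
  rw [h0, PySem.Dict.getD_foldl_modify_append]
  simp [PySem.Dict.getD_empty]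

lemma children_sound (nodes : List (List (String × String))) (pid cid : String)
    (h : cid ∈ (pvChildren nodes).getD pid []) :
    ∃ node ∈ nodes, pvIdOf node = cid ∧ pvParentOf node = pid ∧ pvIdOf node ≠ "" := by
  rw [children_getD] at h
  simp only [List.mem_map, List.mem_filter, bne_iff_ne, beq_iff_eq] at h
  obtain ⟨p, ⟨⟨node, ⟨⟨hn, hid⟩, hp⟩⟩, hp1⟩, hp2⟩ := h
  refine ⟨node, hn, ?_, ?_, by simpa using hid⟩
  · rw [← hp2, ← hp]
  · rw [← hp1, ← hp]

lemma children_complete (nodes : List (List (String × String)))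
    (node : List (String × String)) (h : node ∈ nodes) (hn : pvIdOf node ≠ "") :
    pvIdOf node ∈ (pvChildren nodes).getD (pvParentOf node) [] := by
  rw [children_getD]
  simp only [List.mem_map, List.mem_filter, beq_iff_eq]
  exact ⟨(pvParentOf node, pvIdOf node),
    ⟨⟨node, by simp [h, bne_iff_ne, hn]⟩, rfl⟩, rfl⟩

-- ---- B-side DFS lemmas ----
lemma visit_set_prefix (cs : List String) :
    ∀ st : PySem.Set String × List String, st.1 <+: (pvVisit cs st).1 := by
  induction cs with
  | nil => intro st; exact List.prefix_refl _
  | cons c cs ih =>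
    intro ⟨S, stk⟩
    simp only [pvVisit, List.foldl_cons]
    by_cases hc : (!(S.contains c)) = true
    · simp only [hc, if_true]
      exact (set_add_prefix S c).trans (ih (S.add c, stk ++ [c]))
    · simp only [hc]
      exact ih (S, stk)

lemma visit_stack_prefix (cs : List String) :
    ∀ st : PySem.Set String × List String, st.2 <+: (pvVisit cs st).2 := by
  induction cs with
  | nil => intro st; exact List.prefix_refl _
  | cons c cs ih =>
    intro ⟨S, stk⟩
    simp only [pvVisit, List.foldl_cons]
    by_cases hc : (!(S.contains c)) = true
    · simp only [hc, if_true]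
      exact (List.prefix_append stk [c]).trans (ih (S.add c, stk ++ [c]))
    · simp only [hc]
      exact ih (S, stk)

lemma visit_mem_cs (cs : List String) :
    ∀ st : PySem.Set String × List String, ∀ cid ∈ cs, cid ∈ (pvVisit cs st).1 := by
  induction cs with
  | nil => intro st cid h; exact absurd h (List.not_mem_nil)
  | cons c cs ih =>
    intro ⟨S, stk⟩ cid hcid
    simp only [pvVisit, List.foldl_cons]
    by_cases hc : (!(S.contains c)) = true
    · simp only [hc, if_true]
      rcases List.mem_cons.1 hcid with rfl | hcid
      · exact (visit_set_prefix cs _).subset ((PySem.Set.mem_add S cid cid).2 (Or.inr rfl))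
      · exact ih (S.add c, stk ++ [c]) cid hcid
    · simp only [hc]
      rcases List.mem_cons.1 hcid with rfl | hcid
      · have hmem : cid ∈ S := by
          cases hb : S.contains cid with
          | false => exact absurd (by rw [hb]; rfl) hc
          | true => exact (PySem.Set.contains_iff S cid).1 hb
        exact (visit_set_prefix cs _).subset hmem
      · exact ih (S, stk) cid hcid

lemma visit_new_mem (cs : List String) :
    ∀ st : PySem.Set String × List String, ∀ x ∈ (pvVisit cs st).1, x ∈ st.1 ∨ x ∈ cs := by
  induction cs with
  | nil => intro st x hx; exact Or.inl hx
  | cons c cs ih =>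
    intro ⟨S, stk⟩ x hx
    simp only [pvVisit, List.foldl_cons] at hx
    by_cases hc : (!(S.contains c)) = true
    · simp only [hc, if_true] at hx
      rcases ih (S.add c, stk ++ [c]) x hx with h | h
      · rcases (PySem.Set.mem_add S c x).1 h with h' | h'
        · exact Or.inl h'
        · exact Or.inr (by simp [h'])
      · exact Or.inr (by simp [h])
    · simp only [hc] at hx
      rcases ih (S, stk) x hx with h | h
      · exact Or.inl h
      · exact Or.inr (by simp [h])

lemma visit_new_stack (cs : List String) :
    ∀ st : PySem.Set String × List String, ∀ x ∈ (pvVisit cs st).1,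
      x ∈ st.1 ∨ x ∈ (pvVisit cs st).2 := by
  induction cs with
  | nil => intro st x hx; exact Or.inl hx
  | cons c cs ih =>
    intro ⟨S, stk⟩ x hx
    simp only [pvVisit, List.foldl_cons] at hx ⊢
    by_cases hc : (!(S.contains c)) = true
    · simp only [hc, if_true] at hx ⊢
      rcases ih (S.add c, stk ++ [c]) x hx with h | h
      · rcases (PySem.Set.mem_add S c x).1 h with h' | h'
        · exact Or.inl h'
        · subst h'
          exact Or.inr ((visit_stack_prefix cs _).subset (by simp))
      · exact Or.inr h
    · simp only [hc] at hx ⊢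
      exact ih (S, stk) x hx

lemma visit_nodup (cs : List String) :
    ∀ st : PySem.Set String × List String, st.1.Nodup → (pvVisit cs st).1.Nodup := by
  induction cs with
  | nil => intro st h; exact h
  | cons c cs ih =>
    intro ⟨S, stk⟩ h
    simp only [pvVisit, List.foldl_cons]
    by_cases hc : (!(S.contains c)) = true
    · simp only [hc, if_true]
      exact ih (S.add c, stk ++ [c]) (PySem.Set.nodup_add S c h)
    · simp only [hc]
      exact ih (S, stk) h

lemma visit_length (cs : List String) :
    ∀ st : PySem.Set String × List String,
      (pvVisit cs st).2.length + st.1.length = st.2.length + (pvVisit cs st).1.length := by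
  induction cs with
  | nil => intro st; rfl
  | cons c cs ih =>
    intro ⟨S, stk⟩
    simp only [pvVisit, List.foldl_cons]
    by_cases hc : (!(S.contains c)) = true
    · simp only [hc, if_true]
      have hmem : c ∉ S := by
        intro hm
        rw [(PySem.Set.contains_iff S c).2 hm] at hc
        simp at hc
      have hlen : (S.add c).length = S.length + 1 := by
        unfold PySem.Set.add
        simp [hmem]
      have := ih (S.add c, stk ++ [c])
      simp only [pvVisit] at this
      simp only [List.length_append, List.length_cons, List.length_nil] at this ⊢
      omega
    · simp only [hc]
      exact ih (S, stk)

lemma visit_stack_sub (cs : List String) :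
    ∀ st : PySem.Set String × List String, (∀ x ∈ st.2, x ∈ st.1) →
      ∀ x ∈ (pvVisit cs st).2, x ∈ (pvVisit cs st).1 := by
  induction cs with
  | nil => intro st h x hx; exact h x hx
  | cons c cs ih =>
    intro ⟨S, stk⟩ h x hx
    simp only [pvVisit, List.foldl_cons] at hx ⊢
    by_cases hc : (!(S.contains c)) = true
    · simp only [hc, if_true] at hx ⊢
      refine ih (S.add c, stk ++ [c]) ?_ x hx
      intro y hy
      rcases List.mem_append.1 hy with hy | hy
      · exact (PySem.Set.mem_add S c y).2 (Or.inl (h y hy))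
      · exact (PySem.Set.mem_add S c y).2 (Or.inr (by simpa using hy))
    · simp only [hc] at hx ⊢
      exact ih (S, stk) h x hx

lemma loopB_main (nodes : List (List (String × String))) (t : String) :
    ∀ (fuel : Nat) (S : PySem.Set String) (stack : List String), S.Nodup →
      (∀ x ∈ S, x ∈ pvCand nodes t) → (∀ x ∈ S, pvDesc nodes t x) →
      (∀ x ∈ stack, x ∈ S) →
      (∀ node ∈ nodes, pvParentOf node ∈ S → pvParentOf node ∉ stack → pvIdOf node ≠ "" →
        pvIdOf node ∈ S) →
      stack.length + (pvCand nodes t).toFinset.card ≤ fuel + S.length →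
      (∀ x ∈ S, x ∈ pvLoopB (pvChildren nodes) fuel (S, stack)) ∧
      (∀ x ∈ pvLoopB (pvChildren nodes) fuel (S, stack), pvDesc nodes t x) ∧
      (∀ node ∈ nodes, pvParentOf node ∈ pvLoopB (pvChildren nodes) fuel (S, stack) →
        pvIdOf node ≠ "" → pvIdOf node ∈ pvLoopB (pvChildren nodes) fuel (S, stack)) := by
  intro fuel
  induction fuel with
  | zero =>
    intro S stack h1 h2 h3 hstack hclosed hb
    have hcard := pv_length_le_card nodes t S h1 h2
    have hnil : stack = [] := List.length_eq_zero_iff.1 (by omega)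
    subst hnil
    have hres : pvLoopB (pvChildren nodes) 0 (S, []) = S := rfl
    rw [hres]
    exact ⟨fun x hx => hx, h3, fun node hn hp hid => hclosed node hn hp (by simp) hid⟩
  | succ f ih =>
    intro S stack h1 h2 h3 hstack hclosed hb
    rcases List.eq_nil_or_concat stack with rfl | ⟨ys, u, rfl⟩
    · have hres : pvLoopB (pvChildren nodes) (f + 1) (S, []) = S := by
        rw [pvLoopB]; rfl
      rw [hres]
      exact ⟨fun x hx => hx, h3, fun node hn hp hid => hclosed node hn hp (by simp) hid⟩
    · rw [List.concat_eq_append] at hstack hclosed hb ⊢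
      have hres : pvLoopB (pvChildren nodes) (f + 1) (S, ys ++ [u]) =
          pvLoopB (pvChildren nodes) f
            (pvVisit ((pvChildren nodes).getD u []) (S, ys)) := by
        rw [pvLoopB, PySem.List.pop?_last]
      set cs := (pvChildren nodes).getD u [] with hcs
      have hu : u ∈ S := hstack u (by simp)
      have hS'1 : (pvVisit cs (S, ys)).1.Nodup := visit_nodup cs (S, ys) h1
      have hS'2 : ∀ x ∈ (pvVisit cs (S, ys)).1, x ∈ pvCand nodes t := by
        intro x hx
        rcases visit_new_mem cs (S, ys) x hx with h | h
        · exact h2 x h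
        · obtain ⟨node, hn, hid, _, _⟩ := children_sound nodes u x h
          exact hid ▸ List.mem_cons_of_mem _ (List.mem_map_of_mem hn)
      have hS'3 : ∀ x ∈ (pvVisit cs (S, ys)).1, pvDesc nodes t x := by
        intro x hx
        rcases visit_new_mem cs (S, ys) x hx with h | h
        · exact h3 x h
        · obtain ⟨node, hn, hid, hpid, hne⟩ := children_sound nodes u x h
          exact hid ▸ pvDesc.step node hn (hpid ▸ h3 u hu) hne
      have hstack' : ∀ x ∈ (pvVisit cs (S, ys)).2, x ∈ (pvVisit cs (S, ys)).1 := by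
        refine visit_stack_sub cs (S, ys) ?_
        intro y hy
        exact hstack y (by simp [hy])
      have hclosed' : ∀ node ∈ nodes, pvParentOf node ∈ (pvVisit cs (S, ys)).1 →
          pvParentOf node ∉ (pvVisit cs (S, ys)).2 → pvIdOf node ≠ "" →
          pvIdOf node ∈ (pvVisit cs (S, ys)).1 := by
        intro node hn hpmem hpnotin hid
        rcases visit_new_stack cs (S, ys) _ hpmem with hpS | hpStk
        · by_cases hpin : pvParentOf node ∈ ys ++ [u]
          · rcases List.mem_append.1 hpin with hys | hu'
            · exact absurd ((visit_stack_prefix cs (S, ys)).subset hys) hpnotin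
            · have hpu : pvParentOf node = u := by simpa using hu'
              have hin := children_complete nodes node hn hid
              rw [hpu] at hin
              exact visit_mem_cs cs (S, ys) _ hin
          · exact (visit_set_prefix cs (S, ys)).subset (hclosed node hn hpS hpin hid)
        · exact absurd hpStk hpnotin
      have hlen : (pvVisit cs (S, ys)).2.length + S.length
          = ys.length + (pvVisit cs (S, ys)).1.length := visit_length cs (S, ys)
      have hb' : (pvVisit cs (S, ys)).2.length + (pvCand nodes t).toFinset.card ≤
          f + (pvVisit cs (S, ys)).1.length := by
        simp only [List.length_append, List.length_cons, List.length_nil] at hb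
        omega
      obtain ⟨p1, p2, p3⟩ := ih (pvVisit cs (S, ys)).1 (pvVisit cs (S, ys)).2
        hS'1 hS'2 hS'3 hstack' hclosed' hb'
      rw [hres]
      exact ⟨fun x hx => p1 x ((visit_set_prefix cs (S, ys)).subset hx), p2, p3⟩

lemma memB (nodes : List (List (String × String))) (t : String) (x : String) :
    x ∈ pvLoopB (pvChildren nodes) (nodes.length + 2) (PySem.Set.ofList [t], [t]) ↔
      pvDesc nodes t x := by
  have h1 : (PySem.Set.ofList [t] : List String).Nodup := PySem.Set.nodup_ofList [t]
  have h2 : ∀ x ∈ (PySem.Set.ofList [t] : List String), x ∈ pvCand nodes t := by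
    intro x hx
    have : x ∈ [t] := (PySem.Set.mem_ofList [t] x).1 hx
    simp at this
    simp [this, pvCand]
  have h3 : ∀ x ∈ (PySem.Set.ofList [t] : List String), pvDesc nodes t x := by
    intro x hx
    have : x ∈ [t] := (PySem.Set.mem_ofList [t] x).1 hx
    simp at this
    exact this ▸ pvDesc.base
  have hstack : ∀ x ∈ [t], x ∈ (PySem.Set.ofList [t] : List String) := by
    intro x hx
    exact (PySem.Set.mem_ofList [t] x).2 hx
  have hclosed : ∀ node ∈ nodes, pvParentOf node ∈ (PySem.Set.ofList [t] : List String) →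
      pvParentOf node ∉ [t] → pvIdOf node ≠ "" →
      pvIdOf node ∈ (PySem.Set.ofList [t] : List String) := by
    intro node _ hp hnp _
    exact absurd (by simpa using (PySem.Set.mem_ofList [t] _).1 hp) (by simpa using hnp)
  have hlen : (PySem.Set.ofList [t] : List String).length = 1 := rfl
  have hcard : (pvCand nodes t).toFinset.card ≤ nodes.length + 1 := by
    have := List.toFinset_card_le (pvCand nodes t)
    simpa [pvCand] using this
  obtain ⟨p1, p2, p3⟩ := loopB_main nodes t (nodes.length + 2) (PySem.Set.ofList [t]) [t]
    h1 h2 h3 hstack hclosed (by simp [hlen]; omega)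
  constructor
  · exact p2 x
  · intro hd
    induction hd with
    | base => exact p1 t ((PySem.Set.mem_ofList [t] t).2 (by simp))
    | step node hmem hpp hn ih' => exact p3 node hmem ih' hn

-- ===== VERDICT (by name: the statement is the Claim_ definition above) =====
theorem delete_node_and_descendants_py_spec : Claim_equal_delete_node_and_descendants_py := by
  intro nodes t _
  unfold Spec_delete_node_and_descendants_py
  unfold delete_node_and_descendants_py delete_node_and_descendants_py_alt
  refine List.filter_congr ?_
  intro node _
  have h : (pvLoopA nodes (nodes.length + 2) (PySem.Set.ofList [t])).contains (pvIdOf node)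
      = (pvLoopB (pvChildren nodes) (nodes.length + 2)
          (PySem.Set.ofList [t], [t])).contains (pvIdOf node) := by
    rw [Bool.eq_iff_iff, PySem.Set.contains_iff, PySem.Set.contains_iff, memA, memB]
  rw [h]
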